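-- pv_equiv track=rewrite | github.com/ajoubaita/Bonding_Bot | src/similarity/features/resolution_similarity.py | are_sources_similar
-- ===== SOURCE A (Python) =====
-- from typing import Dict, Set
--
-- SIMILAR_SOURCES: Dict[str, Set[str]] = {
--     "bls": {"bureau_of_labor_statistics", "bls", "labor_statistics"},
--     "fomc": {"federal_reserve", "fomc", "fed", "federal_open_market_committee"},
--     "coingecko": {"coingecko", "coin_gecko"},
--     "coinmarketcap": {"coinmarketcap", "coin_market_cap", "cmc"},
--     "ap": {"associated_press", "ap"},
--     "nyt": {"new_york_times", "nyt", "ny_times"},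
--     "cnn": {"cnn", "cable_news_network"},
--     "fox": {"fox_news", "fox"},
--     "nasdaq": {"nasdaq"},
--     "nyse": {"nyse", "new_york_stock_exchange"},
-- }
--
-- def normalize_source(source: str) -> str:
--     """Normalize resolution source string.
--
--     Args:
--         source: Resolution source string
--
--     Returns:
--         Normalized source (lowercased, underscored)
--     """
--     if not source:
--         return "unknown"
--
--     # Lowercase and replace spaces with underscores
--     normalized = source.lower().strip().replace(" ", "_").replace("-", "_")
--
--     # Map to canonical form
--     for canonical, variants in SIMILAR_SOURCES.items():
--         if normalized in variants:
--             return canonical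
--
--     return normalized
--
-- def are_sources_similar(source1: str, source2: str) -> bool:
--     """Check if two sources are similar.
--
--     Args:
--         source1: First source
--         source2: Second source
--
--     Returns:
--         True if sources are similar
--     """
--     if not source1 or not source2:
--         return False
--
--     norm1 = normalize_source(source1)
--     norm2 = normalize_source(source2)
--
--     # Exact match
--     if norm1 == norm2:
--         return True
--
--     # Check if both belong to same similar group
--     for canonical, variants in SIMILAR_SOURCES.items():
--         if norm1 in variants and norm2 in variants:
--             return True
--
--     return False
-- ===== SOURCE B (Python) =====
-- from typing import Dict, Set
--
-- SIMILAR_SOURCES: Dict[str, Set[str]] = {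
--     "bls": {"bureau_of_labor_statistics", "bls", "labor_statistics"},
--     "fomc": {"federal_reserve", "fomc", "fed", "federal_open_market_committee"},
--     "coingecko": {"coingecko", "coin_gecko"},
--     "coinmarketcap": {"coinmarketcap", "coin_market_cap", "cmc"},
--     "ap": {"associated_press", "ap"},
--     "nyt": {"new_york_times", "nyt", "ny_times"},
--     "cnn": {"cnn", "cable_news_network"},
--     "fox": {"fox_news", "fox"},
--     "nasdaq": {"nasdaq"},
--     "nyse": {"nyse", "new_york_stock_exchange"},
-- }
--
-- # Reverse index built once: variant -> canonical (variants are globally distinct).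
-- _REVERSE_INDEX: Dict[str, str] = {
--     variant: canonical
--     for canonical, variants in SIMILAR_SOURCES.items()
--     for variant in variants
-- }
--
-- def normalize_source(source: str) -> str:
--     if not source:
--         return "unknown"
--     normalized = source.lower().strip().replace(" ", "_").replace("-", "_")
--     return _REVERSE_INDEX.get(normalized, normalized)
--
-- def are_sources_similar(source1: str, source2: str) -> bool:
--     if not source1 or not source2:
--         return False
--     return normalize_source(source1) == normalize_source(source2)
-- ===== Notes on version B (the rewrite author's own statement) =====
-- stated objective: idiomatic
-- what changed: B precomputes a module-level reverse index {variant: canonical}, normalizes via a single dict lookup instead of scanning the dict-of-sets, and compares the two normalized strings directly, dropping A's redundant same-group loop (dead because every canonical is in its own variant set and the sets are disjoint).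
import Mathlib
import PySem

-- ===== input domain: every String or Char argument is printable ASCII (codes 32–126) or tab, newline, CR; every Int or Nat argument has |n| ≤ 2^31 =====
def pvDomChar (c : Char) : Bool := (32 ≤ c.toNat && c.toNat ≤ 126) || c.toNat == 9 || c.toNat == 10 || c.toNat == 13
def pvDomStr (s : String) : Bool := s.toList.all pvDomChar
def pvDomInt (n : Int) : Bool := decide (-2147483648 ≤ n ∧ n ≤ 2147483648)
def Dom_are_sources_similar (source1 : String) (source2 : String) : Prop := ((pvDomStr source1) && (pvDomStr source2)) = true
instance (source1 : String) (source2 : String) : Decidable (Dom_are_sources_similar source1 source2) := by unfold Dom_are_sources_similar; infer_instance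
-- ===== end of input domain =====

set_option maxHeartbeats 1000000


-- B replaces A's repeated scans over the dict-of-sets by a precomputed reverse index
-- (variant -> canonical) and a single normalized-string comparison (objective: idiomatic).

-- ===== PORT A =====
def SIMILAR_SOURCES : List (String × List String) := [
  ("bls", ["bureau_of_labor_statistics", "bls", "labor_statistics"]),
  ("fomc", ["federal_reserve", "fomc", "fed", "federal_open_market_committee"]),
  ("coingecko", ["coingecko", "coin_gecko"]),
  ("coinmarketcap", ["coinmarketcap", "coin_market_cap", "cmc"]),
  ("ap", ["associated_press", "ap"]),
  ("nyt", ["new_york_times", "nyt", "ny_times"]),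
  ("cnn", ["cnn", "cable_news_network"]),
  ("fox", ["fox_news", "fox"]),
  ("nasdaq", ["nasdaq"]),
  ("nyse", ["nyse", "new_york_stock_exchange"])]

def normalize_source (source : String) : String :=
  if source = "" then "unknown"
  else
    let normalized := PySem.Str.replace (PySem.Str.replace (PySem.Str.strip (PySem.Str.lower source)) " " "_") "-" "_"
    -- for canonical, variants in SIMILAR_SOURCES: if normalized in variants: return canonical
    match SIMILAR_SOURCES.find? (fun p => p.2.contains normalized) with
    | some p => p.1
    | none => normalized

def are_sources_similar (source1 : String) (source2 : String) : Bool :=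
  if source1 = "" || source2 = "" then false
  else
    let norm1 := normalize_source source1
    let norm2 := normalize_source source2
    if norm1 = norm2 then true
    else
      -- for canonical, variants in SIMILAR_SOURCES: if norm1 in variants and norm2 in variants: return True
      SIMILAR_SOURCES.any (fun p => p.2.contains norm1 && p.2.contains norm2)

-- ===== PORT B =====
-- _REVERSE_INDEX = {variant: canonical for canonical, variants in SIMILAR_SOURCES.items() for variant in variants}
def REVERSE_INDEX : PySem.Dict String String :=
  SIMILAR_SOURCES.foldl (fun d p => p.2.foldl (fun d v => d.insert v p.1) d) PySem.Dict.empty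

def normalize_source_alt (source : String) : String :=
  if source = "" then "unknown"
  else
    let normalized := PySem.Str.replace (PySem.Str.replace (PySem.Str.strip (PySem.Str.lower source)) " " "_") "-" "_"
    REVERSE_INDEX.getD normalized normalized

def are_sources_similar_alt (source1 : String) (source2 : String) : Bool :=
  if source1 = "" || source2 = "" then false
  else normalize_source_alt source1 == normalize_source_alt source2

-- ===== PRECONDITION & SPEC =====
def Spec_are_sources_similar (source1 : String) (source2 : String) (out : Bool) : Prop := out = are_sources_similar_alt source1 source2
instance (source1 : String) (source2 : String) (out : Bool) : Decidable (Spec_are_sources_similar source1 source2 out) := by unfold Spec_are_sources_similar; infer_instance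

-- ===== CLAIM (what is proved, stated in full; the proofs are below) =====
def Claim_equal_are_sources_similar : Prop := ∀ (source1 : String) (source2 : String), Dom_are_sources_similar source1 source2 → Spec_are_sources_similar source1 source2 (are_sources_similar source1 source2)

-- ===== LEMMAS AND PROOFS =====

-- The two lookups (first group whose variant set contains n, vs reverse-index get) agree.
lemma lookup_eq (n : String) :
    (match SIMILAR_SOURCES.find? (fun p => p.2.contains n) with
     | some p => p.1
     | none => n) = REVERSE_INDEX.getD n n := by
  have hR : REVERSE_INDEX = ⟨[("bureau_of_labor_statistics", "bls"), ("bls", "bls"), ("labor_statistics", "bls"), ("federal_reserve", "fomc"), ("fomc", "fomc"), ("fed", "fomc"), ("federal_open_market_committee", "fomc"), ("coingecko", "coingecko"), ("coin_gecko", "coingecko"), ("coinmarketcap", "coinmarketcap"), ("coin_market_cap", "coinmarketcap"), ("cmc", "coinmarketcap"), ("associated_press", "ap"), ("ap", "ap"), ("new_york_times", "nyt"), ("nyt", "nyt"), ("ny_times", "nyt"), ("cnn", "cnn"), ("cable_news_network", "cnn"), ("fox_news", "fox"), ("fox", "fox"), ("nasdaq", "nasdaq"), ("nyse", "nyse"),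 ("new_york_stock_exchange", "nyse")]⟩ := rfl
  rw [hR]
  by_cases h1 : "bureau_of_labor_statistics" = n
  · subst h1; decide
  by_cases h2 : "bls" = n
  · subst h2; decide
  by_cases h3 : "labor_statistics" = n
  · subst h3; decide
  by_cases h4 : "federal_reserve" = n
  · subst h4; decide
  by_cases h5 : "fomc" = n
  · subst h5; decide
  by_cases h6 : "fed" = n
  · subst h6; decide
  by_cases h7 : "federal_open_market_committee" = n
  · subst h7; decide
  by_cases h8 : "coingecko" = n
  · subst h8; decide
  by_cases h9 : "coin_gecko" = n
  · subst h9; decide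
  by_cases h10 : "coinmarketcap" = n
  · subst h10; decide
  by_cases h11 : "coin_market_cap" = n
  · subst h11; decide
  by_cases h12 : "cmc" = n
  · subst h12; decide
  by_cases h13 : "associated_press" = n
  · subst h13; decide
  by_cases h14 : "ap" = n
  · subst h14; decide
  by_cases h15 : "new_york_times" = n
  · subst h15; decide
  by_cases h16 : "nyt" = n
  · subst h16; decide
  by_cases h17 : "ny_times" = n
  · subst h17; decide
  by_cases h18 : "cnn" = n
  · subst h18; decide
  by_cases h19 : "cable_news_network" = n
  · subst h19; decide
  by_cases h20 : "fox_news" = n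
  · subst h20; decide
  by_cases h21 : "fox" = n
  · subst h21; decide
  by_cases h22 : "nasdaq" = n
  · subst h22; decide
  by_cases h23 : "nyse" = n
  · subst h23; decide
  by_cases h24 : "new_york_stock_exchange" = n
  · subst h24; decide
  simp only [SIMILAR_SOURCES, PySem.Dict.getD, PySem.Dict.get?, List.find?, List.contains, List.elem, Option.map, Option.getD, beq_eq_false_iff_ne.mpr h1, beq_eq_false_iff_ne.mpr (Ne.symm h1), beq_eq_false_iff_ne.mpr h2, beq_eq_false_iff_ne.mpr (Ne.symm h2), beq_eq_false_iff_ne.mpr h3, beq_eq_false_iff_ne.mpr (Ne.symm h3), beq_eq_false_iff_ne.mpr h4, beq_eq_false_iff_ne.mpr (Ne.symm h4), beq_eq_false_iff_ne.mpr h5, beq_eq_false_iff_ne.mpr (Ne.symm h5), beq_eq_false_iff_ne.mpr h6, beq_eq_false_iff_ne.mpr (Ne.symm h6), beq_eq_false_iff_ne.mpr h7, beq_eq_false_iff_ne.mpr (Ne.symm h7), beq_eq_false_iff_ne.mpr h8, beq_eq_false_iff_ne.mpr (Ne.symm h8), beq_eq_false_iff_ne.mpr h9, beq_eq_false_iff_ne.mpr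 (Ne.symm h9), beq_eq_false_iff_ne.mpr h10, beq_eq_false_iff_ne.mpr (Ne.symm h10), beq_eq_false_iff_ne.mpr h11, beq_eq_false_iff_ne.mpr (Ne.symm h11), beq_eq_false_iff_ne.mpr h12, beq_eq_false_iff_ne.mpr (Ne.symm h12), beq_eq_false_iff_ne.mpr h13, beq_eq_false_iff_ne.mpr (Ne.symm h13), beq_eq_false_iff_ne.mpr h14, beq_eq_false_iff_ne.mpr (Ne.symm h14), beq_eq_false_iff_ne.mpr h15, beq_eq_false_iff_ne.mpr (Ne.symm h15), beq_eq_false_iff_ne.mpr h16, beq_eq_false_iff_ne.mpr (Ne.symm h16), beq_eq_false_iff_ne.mpr h17, beq_eq_false_iff_ne.mpr (Ne.symm h17), beq_eq_false_iff_ne.mpr h18, beq_eq_false_iff_ne.mpr (Ne.symm h18), beq_eq_false_iff_ne.mpr h19, beq_eq_false_iff_ne.mpr (Ne.symm h19), beq_eq_false_iff_ne.mpr h20, beq_eq_false_iff_ne.mpr (Ne.symm h20), beq_eq_false_iff_ne.mpr h21, beq_eq_false_iff_ne.mpr (Ne.symm h21), beq_eq_false_iff_ne.mpr h22, beq_eq_false_iff_ne.mpr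 (Ne.symm h22), beq_eq_false_iff_ne.mpr h23, beq_eq_false_iff_ne.mpr (Ne.symm h23), beq_eq_false_iff_ne.mpr h24, beq_eq_false_iff_ne.mpr (Ne.symm h24)]

lemma norm_src_eq (s : String) : normalize_source s = normalize_source_alt s := by
  rw [normalize_source, normalize_source_alt]
  by_cases h : s = ""
  · rw [if_pos h, if_pos h]
  · rw [if_neg h, if_neg h]
    simp only [lookup_eq]

-- Every value normalize_source returns is canonical for any group that contains it.
lemma normalize_canonical (s : String) :
    ∀ p ∈ SIMILAR_SOURCES, p.2.contains (normalize_source s) → p.1 = normalize_source s := by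
  unfold normalize_source
  split
  · decide
  · rename_i hne
    intro p hp
    cases hf : SIMILAR_SOURCES.find? (fun p => p.2.contains
        (PySem.Str.replace (PySem.Str.replace (PySem.Str.strip (PySem.Str.lower s)) " " "_") "-" "_")) with
    | none =>
      simp only [hf]
      have := List.find?_eq_none.mp hf p hp
      simp_all
    | some q =>
      simp only [hf]
      have hq : q ∈ SIMILAR_SOURCES := List.mem_of_find?_eq_some hf
      have key : ∀ p ∈ SIMILAR_SOURCES, ∀ q ∈ SIMILAR_SOURCES, p.2.contains q.1 → p.1 = q.1 := by decide
      exact fun hc => key p hp q hq hc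

lemma no_pair (m1 m2 : String)
    (h1 : ∀ p ∈ SIMILAR_SOURCES, p.2.contains m1 → p.1 = m1)
    (h2 : ∀ p ∈ SIMILAR_SOURCES, p.2.contains m2 → p.1 = m2)
    (hne : m1 ≠ m2) :
    SIMILAR_SOURCES.any (fun p => p.2.contains m1 && p.2.contains m2) = false := by
  rw [List.any_eq_false]
  intro p hp
  simp only [Bool.and_eq_true, not_and]
  intro hc1 hc2
  exact hne ((h1 p hp hc1).symm.trans (h2 p hp hc2))

-- ===== VERDICT (by name: the statement is the Claim_ definition above) =====
theorem are_sources_similar_spec : Claim_equal_are_sources_similar := by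
  intro s1 s2 _
  unfold Spec_are_sources_similar are_sources_similar are_sources_similar_alt
  split
  · rfl
  · simp only []
    by_cases h : normalize_source s1 = normalize_source s2
    · rw [if_pos h, ← norm_src_eq, ← norm_src_eq, h, beq_self_eq_true]
    · rw [if_neg h, no_pair _ _ (normalize_canonical s1) (normalize_canonical s2) h,
        ← norm_src_eq, ← norm_src_eq]
      exact (beq_eq_false_iff_ne.mpr h).symm
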